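-- pv_equiv track=rewrite | github.com/jackclx/FairSplit | functions.py | my_transactions
-- ===== SOURCE A (Python) =====
-- def my_transactions(transactions, username):
--     paid_for = []
--     owes_to = []
--     total_spent = 0
--     total_owed = 0
--
--     for transaction in transactions:
--         id, item, amount, payer, payee = transaction
--         if payer.lower() == username.lower():
--             if payee:
--                 paid_for.append(f"ID {id}: ${amount} for '{item}' (to {payee})")
--             else:
--                 paid_for.append(f"ID {id}: ${amount} for '{item}'")
--             total_spent += amount
--         elif payee and payee.lower() == username.lower():
--             owes_to.append(f"ID {id}:  ${amount}  for '{item}' to {payer}")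
--             total_owed += amount
--
--     formatted_list = f"Transactions for {username}:\n"
--     if paid_for:
--         formatted_list += "\nPaid For:\n" + "\n".join(paid_for)
--     if owes_to:
--         formatted_list += "\n\nOwes:\n" + "\n".join(owes_to)
--     formatted_list += f"\n\nSummary:\nTotal Spent: {total_spent} \nTotal Owed: {total_owed} "
--
--     return formatted_list
-- ===== SOURCE B (Python) =====
-- def my_transactions(transactions, username):
--     u = username.lower()
--     paid = [t for t in transactions if t[3].lower() == u]
--     owed = [t for t in transactions
--             if t[3].lower() != u and t[4] and t[4].lower() == u]
--     total_spent = sum(t[2] for t in paid)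
--     total_owed = sum(t[2] for t in owed)
--     paid_for = [f"ID {id}: ${amount} for '{item}' (to {payee})" if payee
--                 else f"ID {id}: ${amount} for '{item}'"
--                 for (id, item, amount, payer, payee) in paid]
--     owes_to = [f"ID {id}:  ${amount}  for '{item}' to {payer}"
--                for (id, item, amount, payer, payee) in owed]
--     parts = [f"Transactions for {username}:\n"]
--     if paid_for:
--         parts.append("\nPaid For:\n" + "\n".join(paid_for))
--     if owes_to:
--         parts.append("\n\nOwes:\n" + "\n".join(owes_to))
--     parts.append(f"\n\nSummary:\nTotal Spent: {total_spent} \nTotal Owed: {total_owed} ")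
--     return "".join(parts)
-- ===== Notes on version B (the rewrite author's own statement) =====
-- stated objective: alternative
-- what changed: Replaced the single accumulating loop by separate passes: two filters partition the transactions into paid/owed, totals come from independent sums, the display lines from independent list comprehensions, and the report is assembled by joining a parts list.
import Mathlib
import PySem

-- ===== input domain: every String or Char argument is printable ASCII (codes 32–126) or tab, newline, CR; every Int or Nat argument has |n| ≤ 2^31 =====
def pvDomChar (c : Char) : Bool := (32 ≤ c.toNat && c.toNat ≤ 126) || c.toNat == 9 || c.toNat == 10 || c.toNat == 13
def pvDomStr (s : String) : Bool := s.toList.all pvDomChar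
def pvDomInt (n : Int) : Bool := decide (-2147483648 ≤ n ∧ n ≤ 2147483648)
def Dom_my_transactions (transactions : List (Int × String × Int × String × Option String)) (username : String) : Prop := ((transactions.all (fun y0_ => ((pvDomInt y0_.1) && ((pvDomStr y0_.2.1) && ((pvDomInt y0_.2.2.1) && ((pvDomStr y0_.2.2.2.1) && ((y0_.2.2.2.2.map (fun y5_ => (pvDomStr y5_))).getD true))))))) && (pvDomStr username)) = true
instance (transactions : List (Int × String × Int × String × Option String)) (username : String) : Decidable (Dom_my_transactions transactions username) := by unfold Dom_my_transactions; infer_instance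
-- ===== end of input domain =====

-- B re-decomposes A's single accumulating loop into separate filter / sum / format passes
-- joined at the end; same cost, proved to return the identical string.

-- Python truthiness of an Optional[str]: None and "" are falsy.
def pyTruthy (p : Option String) : Bool :=
  match p with
  | none => false
  | some s => s ≠ ""

-- ===== PORT A =====
-- one loop-body step of A's for-loop (state: paid_for, owes_to, total_spent, total_owed)
def stepA (username : String) (st : List String × List String × Int × Int)
    (t : Int × String × Int × String × Option String) :
    List String × List String × Int × Int :=
  let (paid_for, owes_to, total_spent, total_owed) := st
  let (id, item, amount, payer, payee) := t
  if PySem.Str.lower payer = PySem.Str.lower username then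
    if pyTruthy payee then
      (paid_for ++ ["ID " ++ PySem.Int.toStr id ++ ": $" ++ PySem.Int.toStr amount ++
        " for '" ++ item ++ "' (to " ++ payee.getD "" ++ ")"], owes_to,
       total_spent + amount, total_owed)
    else
      (paid_for ++ ["ID " ++ PySem.Int.toStr id ++ ": $" ++ PySem.Int.toStr amount ++
        " for '" ++ item ++ "'"], owes_to, total_spent + amount, total_owed)
  else if pyTruthy payee ∧ PySem.Str.lower (payee.getD "") = PySem.Str.lower username then
    (paid_for, owes_to ++ ["ID " ++ PySem.Int.toStr id ++ ":  $" ++ PySem.Int.toStr amount ++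
      "  for '" ++ item ++ "' to " ++ payer], total_spent, total_owed + amount)
  else
    (paid_for, owes_to, total_spent, total_owed)

def my_transactions (transactions : List (Int × String × Int × String × Option String)) (username : String) : String :=
  let st := transactions.foldl (stepA username) ([], [], 0, 0)
  let (paid_for, owes_to, total_spent, total_owed) := st
  let formatted_list := "Transactions for " ++ username ++ ":\n"
  let formatted_list := if paid_for ≠ [] then
      formatted_list ++ "\nPaid For:\n" ++ String.intercalate "\n" paid_for
    else formatted_list
  let formatted_list := if owes_to ≠ [] then
      formatted_list ++ "\n\nOwes:\n" ++ String.intercalate "\n" owes_to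
    else formatted_list
  formatted_list ++ "\n\nSummary:\nTotal Spent: " ++ PySem.Int.toStr total_spent ++
    " \nTotal Owed: " ++ PySem.Int.toStr total_owed ++ " "

-- ===== PORT B =====
def my_transactions_alt (transactions : List (Int × String × Int × String × Option String)) (username : String) : String :=
  let u := PySem.Str.lower username
  let paid := transactions.filter (fun t => PySem.Str.lower t.2.2.2.1 == u)
  let owed := transactions.filter (fun t =>
    PySem.Str.lower t.2.2.2.1 != u && pyTruthy t.2.2.2.2 &&
      PySem.Str.lower (t.2.2.2.2.getD "") == u)
  let total_spent := (paid.map (fun t => t.2.2.1)).sum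
  let total_owed := (owed.map (fun t => t.2.2.1)).sum
  let paid_for := paid.map (fun t =>
    if pyTruthy t.2.2.2.2 then
      "ID " ++ PySem.Int.toStr t.1 ++ ": $" ++ PySem.Int.toStr t.2.2.1 ++
        " for '" ++ t.2.1 ++ "' (to " ++ t.2.2.2.2.getD "" ++ ")"
    else
      "ID " ++ PySem.Int.toStr t.1 ++ ": $" ++ PySem.Int.toStr t.2.2.1 ++
        " for '" ++ t.2.1 ++ "'")
  let owes_to := owed.map (fun t =>
    "ID " ++ PySem.Int.toStr t.1 ++ ":  $" ++ PySem.Int.toStr t.2.2.1 ++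
      "  for '" ++ t.2.1 ++ "' to " ++ t.2.2.2.1)
  let parts := ["Transactions for " ++ username ++ ":\n"] ++
    (if paid_for ≠ [] then ["\nPaid For:\n" ++ String.intercalate "\n" paid_for] else []) ++
    (if owes_to ≠ [] then ["\n\nOwes:\n" ++ String.intercalate "\n" owes_to] else []) ++
    ["\n\nSummary:\nTotal Spent: " ++ PySem.Int.toStr total_spent ++
      " \nTotal Owed: " ++ PySem.Int.toStr total_owed ++ " "]
  String.join parts

-- ===== PRECONDITION & SPEC =====
def Spec_my_transactions (transactions : List (Int × String × Int × String × Option String)) (username : String) (out : String) : Prop := out = my_transactions_alt transactions username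
instance (transactions : List (Int × String × Int × String × Option String)) (username : String) (out : String) : Decidable (Spec_my_transactions transactions username out) := by unfold Spec_my_transactions; infer_instance

-- ===== CLAIM (what is proved, stated in full; the proofs are below) =====
def Claim_equal_my_transactions : Prop := ∀ (transactions : List (Int × String × Int × String × Option String)) (username : String), Dom_my_transactions transactions username → Spec_my_transactions transactions username (my_transactions transactions username)

-- ===== LEMMAS AND PROOFS =====

-- A's loop, run from an arbitrary accumulator, appends exactly B's filtered/mapped lists
-- and adds exactly B's sums.
theorem loopA_eq (username : String)
    (txs : List (Int × String × Int × String × Option String))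
    (pf ot : List String) (ts tw : Int) :
    txs.foldl (stepA username) (pf, ot, ts, tw) =
      (pf ++ (txs.filter (fun t => PySem.Str.lower t.2.2.2.1 == PySem.Str.lower username)).map
          (fun t =>
            if pyTruthy t.2.2.2.2 then
              "ID " ++ PySem.Int.toStr t.1 ++ ": $" ++ PySem.Int.toStr t.2.2.1 ++
                " for '" ++ t.2.1 ++ "' (to " ++ t.2.2.2.2.getD "" ++ ")"
            else
              "ID " ++ PySem.Int.toStr t.1 ++ ": $" ++ PySem.Int.toStr t.2.2.1 ++
                " for '" ++ t.2.1 ++ "'"),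
       ot ++ (txs.filter (fun t =>
            PySem.Str.lower t.2.2.2.1 != PySem.Str.lower username && pyTruthy t.2.2.2.2 &&
              PySem.Str.lower (t.2.2.2.2.getD "") == PySem.Str.lower username)).map
          (fun t =>
            "ID " ++ PySem.Int.toStr t.1 ++ ":  $" ++ PySem.Int.toStr t.2.2.1 ++
              "  for '" ++ t.2.1 ++ "' to " ++ t.2.2.2.1),
       ts + ((txs.filter (fun t => PySem.Str.lower t.2.2.2.1 == PySem.Str.lower username)).map
          (fun t => t.2.2.1)).sum,
       tw + ((txs.filter (fun t =>
            PySem.Str.lower t.2.2.2.1 != PySem.Str.lower username && pyTruthy t.2.2.2.2 &&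
              PySem.Str.lower (t.2.2.2.2.getD "") == PySem.Str.lower username)).map
          (fun t => t.2.2.1)).sum) := by
  induction txs generalizing pf ot ts tw with
  | nil => simp
  | cons t rest ih =>
    obtain ⟨id, item, amount, payer, payee⟩ := t
    simp only [List.foldl_cons, stepA]
    by_cases h1 : PySem.Str.lower payer = PySem.Str.lower username
    · by_cases h2 : pyTruthy payee = true
      · simp [h1, h2, ih]
        omega
      · simp [h1, h2, ih]
        omega
    · by_cases h2 : pyTruthy payee = true ∧
        PySem.Str.lower (payee.getD "") = PySem.Str.lower username
      · simp [h1, h2.1, h2.2, ih]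
        omega
      · have hfalse : (PySem.Str.lower payer != PySem.Str.lower username && pyTruthy payee &&
            (PySem.Str.lower (payee.getD "") == PySem.Str.lower username)) = false := by
          rcases Bool.eq_false_or_eq_true (pyTruthy payee) with hp | hp
          · have hne : PySem.Str.lower (payee.getD "") ≠ PySem.Str.lower username :=
              fun he => h2 ⟨hp, he⟩
            simp [hp, hne]
          · simp [hp]
        simp [h1, h2, ih, hfalse]

theorem assembleA_eq_join (u : String) (pf ot : List String) (ts tw : Int) :
    (let f1 := "Transactions for " ++ u ++ ":\n"
     let f2 := if pf ≠ [] then f1 ++ "\nPaid For:\n" ++ String.intercalate "\n" pf else f1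
     let f3 := if ot ≠ [] then f2 ++ "\n\nOwes:\n" ++ String.intercalate "\n" ot else f2
     f3 ++ "\n\nSummary:\nTotal Spent: " ++ PySem.Int.toStr ts ++
       " \nTotal Owed: " ++ PySem.Int.toStr tw ++ " ") =
    String.join (["Transactions for " ++ u ++ ":\n"] ++
      (if pf ≠ [] then ["\nPaid For:\n" ++ String.intercalate "\n" pf] else []) ++
      (if ot ≠ [] then ["\n\nOwes:\n" ++ String.intercalate "\n" ot] else []) ++
      ["\n\nSummary:\nTotal Spent: " ++ PySem.Int.toStr ts ++
        " \nTotal Owed: " ++ PySem.Int.toStr tw ++ " "]) := by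
  by_cases hp : pf = [] <;> by_cases ho : ot = [] <;>
    (simp [hp, ho, String.join]
     try simp [← String.append_assoc])

theorem my_transactions_spec' (transactions : List (Int × String × Int × String × Option String))
    (username : String) :
    my_transactions transactions username = my_transactions_alt transactions username := by
  unfold my_transactions my_transactions_alt
  rw [loopA_eq]
  simp only [List.nil_append, zero_add]
  exact assembleA_eq_join username _ _ _ _

-- ===== VERDICT (by name: the statement is the Claim_ definition above) =====
theorem my_transactions_spec : Claim_equal_my_transactions := by
  intro transactions username _
  exact my_transactions_spec' transactions username
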